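-- pv_equiv track=rewrite | github.com/wegfawefgawefg/soundpounder3000 | src/soundpounder3000/parse.py | _comment_cut_index
-- ===== SOURCE A (Python) =====
-- def _comment_cut_index(line: str) -> int:
--     if line.lstrip().startswith("#"):
--         return 0
--
--     cut = len(line)
--     for delim in ("//", ";"):
--         idx = line.find(delim)
--         if idx != -1:
--             cut = min(cut, idx)
--     idx = line.find(" #")
--     if idx != -1:
--         cut = min(cut, idx)
--     return cut
-- ===== SOURCE B (Python) =====
-- def _comment_cut_index(line: str) -> int:
--     if line.lstrip().startswith("#"):
--         return 0
--     for i in range(len(line)):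
--         if line.startswith(("//", ";", " #"), i):
--             return i
--     return len(line)
-- ===== Notes on version B (the rewrite author's own statement) =====
-- stated objective: alternative
-- what changed: Replaces the three separate line.find scans combined with a running min by a single left-to-right scan that returns the first position where any of the three delimiters starts.
import Mathlib
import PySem

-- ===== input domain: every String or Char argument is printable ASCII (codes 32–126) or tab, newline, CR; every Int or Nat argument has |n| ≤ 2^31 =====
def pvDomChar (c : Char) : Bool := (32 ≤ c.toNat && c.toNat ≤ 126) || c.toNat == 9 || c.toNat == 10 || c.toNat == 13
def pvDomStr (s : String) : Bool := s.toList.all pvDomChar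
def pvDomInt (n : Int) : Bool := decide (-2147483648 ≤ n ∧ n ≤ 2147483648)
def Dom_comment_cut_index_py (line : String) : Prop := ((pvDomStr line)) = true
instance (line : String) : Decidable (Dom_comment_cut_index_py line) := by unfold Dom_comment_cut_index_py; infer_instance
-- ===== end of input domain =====

-- B replaces the three separate find scans + running min by one left-to-right scan
-- returning the first position where any of the three delimiters starts (alternative, same cost).

-- ===== PORT A =====
def comment_cut_index_py (line : String) : Int :=
  if PySem.Str.startswith (PySem.Str.lstrip line) "#" then 0
  else
    let cut : Int := PySem.Str.len line
    let cut := ["//", ";"].foldl (fun cut delim =>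
        let idx := PySem.Str.find line delim
        if idx ≠ -1 then min cut idx else cut) cut
    let idx := PySem.Str.find line " #"
    if idx ≠ -1 then min cut idx else cut

-- ===== PORT B =====
-- line.startswith(("//", ";", " #"), i)  checked at the head of the remaining suffix
def pvHit (cs : List Char) : Bool :=
  "//".toList.isPrefixOf cs || ";".toList.isPrefixOf cs || " #".toList.isPrefixOf cs

-- the `for i in range(len(line))` scan: index of the first hit, else len(line)
def pvScan : List Char → Int
  | [] => 0
  | c :: rest => if pvHit (c :: rest) then 0 else 1 + pvScan rest

def comment_cut_index_py_alt (line : String) : Int :=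
  if PySem.Str.startswith (PySem.Str.lstrip line) "#" then 0
  else pvScan line.toList

-- ===== PRECONDITION & SPEC =====
def Spec_comment_cut_index_py (line : String) (out : Int) : Prop := out = comment_cut_index_py_alt line
instance (line : String) (out : Int) : Decidable (Spec_comment_cut_index_py line out) := by unfold Spec_comment_cut_index_py; infer_instance

-- ===== CLAIM (what is proved, stated in full; the proofs are below) =====
def Claim_equal_comment_cut_index_py : Prop := ∀ (line : String), Dom_comment_cut_index_py line → Spec_comment_cut_index_py line (comment_cut_index_py line)

-- ===== LEMMAS AND PROOFS =====

theorem pvScan_nonneg (cs : List Char) : 0 ≤ pvScan cs := by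
  induction cs with
  | nil => simp [pvScan]
  | cons c rest ih => simp only [pvScan]; split <;> omega

theorem pvScan_le_length (cs : List Char) : pvScan cs ≤ cs.length := by
  induction cs with
  | nil => simp [pvScan]
  | cons c rest ih => simp only [pvScan, List.length_cons]; split <;> omega

theorem pvScan_min (cs : List Char) : ∀ i < (pvScan cs).toNat, pvHit (cs.drop i) = false := by
  induction cs with
  | nil => simp [pvScan]
  | cons c rest ih =>
    intro i hi
    simp only [pvScan] at hi
    by_cases h : pvHit (c :: rest) = true
    · simp [h] at hi
    · rw [if_neg h] at hi
      have hnn := pvScan_nonneg rest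
      match i with
      | 0 => simpa using h
      | Nat.succ j =>
        have : j < (pvScan rest).toNat := by omega
        simpa using ih j this

theorem pvScan_hit (cs : List Char) (h : pvScan cs < cs.length) :
    pvHit (cs.drop (pvScan cs).toNat) = true := by
  induction cs with
  | nil => simp [pvScan] at h
  | cons c rest ih =>
    by_cases hh : pvHit (c :: rest) = true
    · simp only [pvScan, hh, if_true]; simpa using hh
    · have hnn := pvScan_nonneg rest
      simp only [pvScan, if_neg hh] at h ⊢
      have h' : pvScan rest < rest.length := by simp at h; omega
      have : (1 + pvScan rest).toNat = (pvScan rest).toNat + 1 := by omega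
      rw [this]
      simpa using ih h'

theorem pv_find_ge_scan (cs d : List Char)
    (hd : ∀ t, d.isPrefixOf t = true → pvHit t = true)
    (h : PySem.Chars.find cs d ≠ -1) : pvScan cs ≤ PySem.Chars.find cs d := by
  by_contra hlt
  rw [not_le] at hlt
  have h0 : 0 ≤ PySem.Chars.find cs d := by
    have := PySem.Chars.neg_one_le_find (s := cs) (sub := d); omega
  have hspec := PySem.Chars.find_spec (s := cs) (sub := d) h0
  have hi : (PySem.Chars.find cs d).toNat < (pvScan cs).toNat := by omega
  have hf := pvScan_min cs _ hi
  have hp : d.isPrefixOf (cs.drop (PySem.Chars.find cs d).toNat) = true :=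
    List.isPrefixOf_iff_prefix.mpr hspec.1
  have := hd _ hp
  rw [hf] at this
  exact Bool.false_ne_true this

theorem pv_find_le_of_prefix_drop (cs d : List Char) (n : Nat) (h : d <+: cs.drop n) :
    PySem.Chars.find cs d ≠ -1 ∧ PySem.Chars.find cs d ≤ (n : Int) := by
  have hin : d <:+: cs := h.isInfix.trans (List.drop_suffix n cs).isInfix
  have hne : PySem.Chars.find cs d ≠ -1 := (PySem.Chars.find_ne_neg_one_iff cs d).mpr hin
  have h0 : 0 ≤ PySem.Chars.find cs d := (PySem.Chars.find_nonneg_iff cs d).mpr hin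
  refine ⟨hne, ?_⟩
  by_contra hlt
  rw [not_le] at hlt
  have hn : n < (PySem.Chars.find cs d).toNat := by omega
  exact (PySem.Chars.find_spec (s := cs) (sub := d) h0).2 n hn h

theorem pvScan_spec (cs : List Char) :
    pvScan cs =
      (let cut : Int := cs.length
       let cut := if PySem.Chars.find cs "//".toList ≠ -1 then min cut (PySem.Chars.find cs "//".toList) else cut
       let cut := if PySem.Chars.find cs ";".toList ≠ -1 then min cut (PySem.Chars.find cs ";".toList) else cut
       if PySem.Chars.find cs " #".toList ≠ -1 then min cut (PySem.Chars.find cs " #".toList) else cut) := by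
  have hnn := pvScan_nonneg cs
  have hle := pvScan_le_length cs
  have hga : PySem.Chars.find cs "//".toList ≠ -1 → pvScan cs ≤ PySem.Chars.find cs "//".toList :=
    pv_find_ge_scan cs _ (fun t ht => by simp [pvHit, List.isPrefixOf_iff_prefix] at ht ⊢; tauto)
  have hgb : PySem.Chars.find cs ";".toList ≠ -1 → pvScan cs ≤ PySem.Chars.find cs ";".toList :=
    pv_find_ge_scan cs _ (fun t ht => by simp [pvHit, List.isPrefixOf_iff_prefix] at ht ⊢; tauto)
  have hgc : PySem.Chars.find cs " #".toList ≠ -1 → pvScan cs ≤ PySem.Chars.find cs " #".toList :=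
    pv_find_ge_scan cs _ (fun t ht => by simp [pvHit, List.isPrefixOf_iff_prefix] at ht ⊢; tauto)
  have hla := PySem.Chars.find_le_length cs "//".toList
  have hlb := PySem.Chars.find_le_length cs ";".toList
  have hlc := PySem.Chars.find_le_length cs " #".toList
  have hub : pvScan cs = cs.length ∨
      (PySem.Chars.find cs "//".toList ≠ -1 ∧ PySem.Chars.find cs "//".toList ≤ pvScan cs) ∨
      (PySem.Chars.find cs ";".toList ≠ -1 ∧ PySem.Chars.find cs ";".toList ≤ pvScan cs) ∨
      (PySem.Chars.find cs " #".toList ≠ -1 ∧ PySem.Chars.find cs " #".toList ≤ pvScan cs) := by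
    rcases eq_or_lt_of_le hle with heq | hlt
    · exact Or.inl heq
    · have hhit := pvScan_hit cs hlt
      have htn : ((pvScan cs).toNat : Int) = pvScan cs := by omega
      simp only [pvHit, Bool.or_eq_true] at hhit
      rcases hhit with (ha | hb) | hc
      · have := pv_find_le_of_prefix_drop cs _ _ (List.isPrefixOf_iff_prefix.mp ha)
        exact Or.inr (Or.inl ⟨this.1, by omega⟩)
      · have := pv_find_le_of_prefix_drop cs _ _ (List.isPrefixOf_iff_prefix.mp hb)
        exact Or.inr (Or.inr (Or.inl ⟨this.1, by omega⟩))
      · have := pv_find_le_of_prefix_drop cs _ _ (List.isPrefixOf_iff_prefix.mp hc)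
        exact Or.inr (Or.inr (Or.inr ⟨this.1, by omega⟩))
  have Ha : PySem.Chars.find cs "//".toList = -1 ∨ pvScan cs ≤ PySem.Chars.find cs "//".toList := by
    by_cases h : PySem.Chars.find cs "//".toList = -1
    · exact Or.inl h
    · exact Or.inr (hga h)
  have Hb : PySem.Chars.find cs ";".toList = -1 ∨ pvScan cs ≤ PySem.Chars.find cs ";".toList := by
    by_cases h : PySem.Chars.find cs ";".toList = -1
    · exact Or.inl h
    · exact Or.inr (hgb h)
  have Hc : PySem.Chars.find cs " #".toList = -1 ∨ pvScan cs ≤ PySem.Chars.find cs " #".toList := by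
    by_cases h : PySem.Chars.find cs " #".toList = -1
    · exact Or.inl h
    · exact Or.inr (hgc h)
  simp only []
  rcases Ha with ha | ha <;> rcases Hb with hb | hb <;> rcases Hc with hc | hc <;>
    rcases hub with h | h | h | h <;> split_ifs <;> omega
  
-- ===== VERDICT (by name: the statement is the Claim_ definition above) =====
theorem comment_cut_index_py_spec : Claim_equal_comment_cut_index_py := by
  intro line _
  unfold Spec_comment_cut_index_py comment_cut_index_py comment_cut_index_py_alt
  rw [pvScan_spec line.toList]
  simp [PySem.Str.len]
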